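-- pv_equiv track=rewrite | github.com/bloopgoop/Wordle | wordle/frequency.py | count_letters_per_space
-- ===== SOURCE A (Python) =====
-- def count_letters_per_space(list):
--     space = []
--     first = {}
--     second = {}
--     third = {}
--     fourth = {}
--     fifth = {}
--     for word in list:
--         if word[0] not in first:
--             first[word[0]] = 1
--         else:
--             first[word[0]] += 1
--
--         if word[1] not in second:
--             second[word[1]] = 1
--         else:
--             second[word[1]] += 1
--
--         if word[2] not in third:
--             third[word[2]] = 1
--         else:
--             third[word[2]] += 1
--
--         if word[3] not in fourth:
--             fourth[word[3]] = 1
--         else: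
--             fourth[word[3]] += 1
--
--         if word[4] not in fifth:
--             fifth[word[4]] = 1
--         else:
--             fifth[word[4]] += 1
--
--     space.append(first)
--     space.append(second)
--     space.append(third)
--     space.append(fourth)
--     space.append(fifth)
--
--     return space
-- ===== SOURCE B (Python) =====
-- def count_letters_per_space(list):
--     space = []
--     for i in range(5):
--         counts = {}
--         for word in list:
--             counts[word[i]] = counts.get(word[i], 0) + 1
--         space.append(counts)
--     return space
-- ===== Notes on version B (the rewrite author's own statement) =====
-- stated objective: simpler
-- what changed: Replaces the word-major single pass maintaining five named dicts with five unrolled update blocks by a position-major loop: for each of the 5 positions one scan of the word list accumulates counts into one fresh dict via d.get(k,0)+1.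
import Mathlib
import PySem

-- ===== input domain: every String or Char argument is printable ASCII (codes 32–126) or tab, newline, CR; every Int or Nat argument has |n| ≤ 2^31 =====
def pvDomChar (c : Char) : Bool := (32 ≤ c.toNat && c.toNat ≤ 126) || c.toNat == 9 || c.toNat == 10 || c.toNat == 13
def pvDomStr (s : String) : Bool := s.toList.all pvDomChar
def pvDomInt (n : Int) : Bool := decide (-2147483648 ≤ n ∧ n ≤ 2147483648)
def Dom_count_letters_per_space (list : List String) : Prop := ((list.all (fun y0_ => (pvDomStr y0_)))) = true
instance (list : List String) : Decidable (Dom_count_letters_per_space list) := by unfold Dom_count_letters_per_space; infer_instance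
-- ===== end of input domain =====

-- B replaces A's word-major pass over five named dicts by a position-major loop
-- (one counting scan of the word list per position): simpler, same cost.

-- word[i] in Python is a 1-char string; exact under Pre_ (index in range);
-- the "" default is never reached on inputs admitted by Pre_.
def pvCharAt (w : String) (i : Int) : String :=
  match PySem.Str.pyGet? w i with
  | some c => String.mk [c]
  | none => ""

-- ===== PORT A =====
-- A's if/else update: 'if k not in d: d[k] = 1 else: d[k] += 1'
def pvUpdA (d : PySem.Dict String Int) (k : String) : PySem.Dict String Int :=
  if d.contains k = false then d.insert k 1 else d.insert k (d.getD k 0 + 1)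

def count_letters_per_space (list : List String) : List (List (String × Int)) :=
  let st := list.foldl
    (fun (s : PySem.Dict String Int × PySem.Dict String Int × PySem.Dict String Int ×
              PySem.Dict String Int × PySem.Dict String Int) word =>
      (pvUpdA s.1 (pvCharAt word 0), pvUpdA s.2.1 (pvCharAt word 1),
       pvUpdA s.2.2.1 (pvCharAt word 2), pvUpdA s.2.2.2.1 (pvCharAt word 3),
       pvUpdA s.2.2.2.2 (pvCharAt word 4)))
    (PySem.Dict.empty, PySem.Dict.empty, PySem.Dict.empty, PySem.Dict.empty, PySem.Dict.empty)
  [st.1.items, st.2.1.items, st.2.2.1.items, st.2.2.2.1.items, st.2.2.2.2.items]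

-- ===== PORT B =====
def count_letters_per_space_alt (list : List String) : List (List (String × Int)) :=
  (PySem.List.pyRange 0 5 1).foldl
    (fun space i =>
      let counts := list.foldl
        (fun d word => d.insert (pvCharAt word i) (d.getD (pvCharAt word i) 0 + 1))
        PySem.Dict.empty
      space ++ [counts.items]) []

-- ===== PRECONDITION & SPEC =====
-- Pre_ excludes exactly the inputs where Python A raises IndexError (a word shorter than 5).
def Pre_count_letters_per_space (list : List String) : Prop :=
  (list.all (fun w => 5 ≤ w.toList.length)) = true
instance (list : List String) : Decidable (Pre_count_letters_per_space list) := by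
  unfold Pre_count_letters_per_space; infer_instance

def pvWitness_count_letters_per_space : List String := ["hello", "world"]

def Spec_count_letters_per_space (list : List String) (out : List (List (String × Int))) : Prop := out = count_letters_per_space_alt list
instance (list : List String) (out : List (List (String × Int))) : Decidable (Spec_count_letters_per_space list out) := by unfold Spec_count_letters_per_space; infer_instance

-- ===== CLAIM (what is proved, stated in full; the proofs are below) =====
def Claim_equal_count_letters_per_space : Prop := ∀ (list : List String), Dom_count_letters_per_space list → Pre_count_letters_per_space list → Spec_count_letters_per_space list (count_letters_per_space list)

-- ===== LEMMAS AND PROOFS =====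

-- A's if/else update equals B's unconditional d[k] = d.get(k, 0) + 1 write.
theorem pvUpdA_eq (d : PySem.Dict String Int) (k : String) :
    pvUpdA d k = d.insert k (d.getD k 0 + 1) := by
  unfold pvUpdA
  by_cases h : d.contains k = false
  · rw [PySem.Dict.getD_of_not_contains d 0 h]; simp [h]
  · simp [h]

-- the fold over A's 5-tuple of independent dicts splits into five per-position folds
theorem pvFoldl_quint (l : List String)
    (a b c d e : PySem.Dict String Int) :
    l.foldl (fun (s : PySem.Dict String Int × PySem.Dict String Int × PySem.Dict String Int ×
                     PySem.Dict String Int × PySem.Dict String Int) word =>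
        (s.1.insert (pvCharAt word 0) (s.1.getD (pvCharAt word 0) 0 + 1),
         s.2.1.insert (pvCharAt word 1) (s.2.1.getD (pvCharAt word 1) 0 + 1),
         s.2.2.1.insert (pvCharAt word 2) (s.2.2.1.getD (pvCharAt word 2) 0 + 1),
         s.2.2.2.1.insert (pvCharAt word 3) (s.2.2.2.1.getD (pvCharAt word 3) 0 + 1),
         s.2.2.2.2.insert (pvCharAt word 4) (s.2.2.2.2.getD (pvCharAt word 4) 0 + 1)))
      (a, b, c, d, e)
    = (l.foldl (fun d w => d.insert (pvCharAt w 0) (d.getD (pvCharAt w 0) 0 + 1)) a,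
       l.foldl (fun d w => d.insert (pvCharAt w 1) (d.getD (pvCharAt w 1) 0 + 1)) b,
       l.foldl (fun d w => d.insert (pvCharAt w 2) (d.getD (pvCharAt w 2) 0 + 1)) c,
       l.foldl (fun d w => d.insert (pvCharAt w 3) (d.getD (pvCharAt w 3) 0 + 1)) d,
       l.foldl (fun d w => d.insert (pvCharAt w 4) (d.getD (pvCharAt w 4) 0 + 1)) e) := by
  induction l generalizing a b c d e with
  | nil => rfl
  | cons x xs ih => simp [List.foldl_cons, ih]

theorem pvRange5 : PySem.List.pyRange 0 5 1 = [0, 1, 2, 3, 4] := by decide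

-- ===== VERDICT (by name: the statement is the Claim_ definition above) =====
theorem count_letters_per_space_spec : Claim_equal_count_letters_per_space := by
  intro list _ _
  unfold Spec_count_letters_per_space count_letters_per_space count_letters_per_space_alt
  simp only [pvUpdA_eq]
  rw [pvFoldl_quint, pvRange5]
  simp
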